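-- pv_equiv track=rewrite | github.com/deglebe/maristmaps | app/locations.py | _pad_room_tokens
-- ===== SOURCE A (Python) =====
-- def _pad_room_tokens(room: str) -> list[str]:
--     """Split a room name like '2016 - Conference Room' into searchable
--     chunks. We keep the full string, any all-digit runs, and any lowercase
--     word so queries like 'conference' still hit.
--     """
--     if not room:
--         return []
--     toks: list[str] = [room.strip()]
--     cur = ""
--     for ch in room:
--         if ch.isalnum():
--             cur += ch
--         else:
--             if cur:
--                 toks.append(cur)
--                 cur = ""
--     if cur:
--         toks.append(cur)
--     return toks
-- ===== SOURCE B (Python) =====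
-- def _pad_room_tokens(room: str) -> list[str]:
--     if not room:
--         return []
--     toks = [room.strip()]
--     i, n = 0, len(room)
--     while i < n:
--         if room[i].isalnum():
--             j = i + 1
--             while j < n and room[j].isalnum():
--                 j += 1
--             toks.append(room[i:j])
--             i = j
--         else:
--             i += 1
--     return toks
-- ===== Notes on version B (the rewrite author's own statement) =====
-- stated objective: alternative
-- what changed: B scans alphanumeric runs with a two-pointer index loop and appends each run as a slice, instead of A's char-by-char accumulator string with flush-on-delimiter logic.
import Mathlib
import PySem

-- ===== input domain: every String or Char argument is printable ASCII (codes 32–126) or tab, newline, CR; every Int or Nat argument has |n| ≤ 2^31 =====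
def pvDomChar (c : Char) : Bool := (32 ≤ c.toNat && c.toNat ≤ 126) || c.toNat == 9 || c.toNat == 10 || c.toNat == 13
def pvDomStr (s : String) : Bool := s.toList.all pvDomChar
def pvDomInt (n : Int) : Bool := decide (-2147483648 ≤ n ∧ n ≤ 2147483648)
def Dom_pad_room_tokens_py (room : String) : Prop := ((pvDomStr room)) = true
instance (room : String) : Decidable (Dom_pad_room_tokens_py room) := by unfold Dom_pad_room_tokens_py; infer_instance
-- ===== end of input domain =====

-- B replaces A's char-by-char accumulator string with a two-pointer run scan (takeWhile/dropWhile slices); same O(n) cost, alternative structure.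

-- ===== PORT A =====
-- the body of A's for loop, acting on the (toks, cur) state
def pvStepA (s : List String × List Char) (ch : Char) : List String × List Char :=
  if PySem.Chars.isalnum ch then (s.1, s.2 ++ [ch])
  else if s.2 ≠ [] then (s.1 ++ [String.ofList s.2], []) else s

def pad_room_tokens_py (room : String) : List String :=
  if room = "" then []
  else
    let p := room.toList.foldl pvStepA ([PySem.Str.strip room], [])
    if p.2 ≠ [] then p.1 ++ [String.ofList p.2] else p.1

-- ===== PORT B =====
-- inner while loop of B: scan to the end of the alphanumeric run, emit the slice
def pvRuns : List Char → List (List Char)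
  | [] => []
  | c :: cs =>
    if PySem.Chars.isalnum c then
      (c :: cs.takeWhile PySem.Chars.isalnum) :: pvRuns (cs.dropWhile PySem.Chars.isalnum)
    else pvRuns cs
termination_by cs => cs.length
decreasing_by
  · have := List.length_dropWhile_le (p := PySem.Chars.isalnum) (l := cs)
    simp; omega
  · simp

def pad_room_tokens_py_alt (room : String) : List String :=
  if room = "" then []
  else PySem.Str.strip room :: (pvRuns room.toList).map String.ofList

-- ===== PRECONDITION & SPEC =====
def Spec_pad_room_tokens_py (room : String) (out : List String) : Prop := out = pad_room_tokens_py_alt room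
instance (room : String) (out : List String) : Decidable (Spec_pad_room_tokens_py room out) := by unfold Spec_pad_room_tokens_py; infer_instance

-- ===== CLAIM (what is proved, stated in full; the proofs are below) =====
def Claim_equal_pad_room_tokens_py : Prop := ∀ (room : String), Dom_pad_room_tokens_py room → Spec_pad_room_tokens_py room (pad_room_tokens_py room)

-- ===== LEMMAS AND PROOFS =====

-- A's loop with a pending (possibly empty) current run, expressed as the runs it will still emit
def pvRunsPre (cur : List Char) : List Char → List (List Char)
  | [] => if cur = [] then [] else [cur]
  | c :: cs =>
    if PySem.Chars.isalnum c then pvRunsPre (cur ++ [c]) cs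
    else if cur = [] then pvRunsPre [] cs else cur :: pvRunsPre [] cs

lemma pvRunsPre_spec (cs : List Char) :
    pvRunsPre [] cs = pvRuns cs ∧
    ∀ cur, cur ≠ [] →
      pvRunsPre cur cs = (cur ++ cs.takeWhile PySem.Chars.isalnum) ::
        pvRuns (cs.dropWhile PySem.Chars.isalnum) := by
  induction cs with
  | nil =>
    refine ⟨by simp [pvRunsPre, pvRuns], fun cur h => ?_⟩
    simp [pvRunsPre, pvRuns, h]
  | cons c cs ih =>
    by_cases h : PySem.Chars.isalnum c
    · refine ⟨?_, fun cur hcur => ?_⟩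
      · rw [show pvRunsPre [] (c :: cs) = pvRunsPre [c] cs by simp [pvRunsPre, h]]
        rw [ih.2 [c] (by simp)]
        simp [pvRuns, h]
      · rw [show pvRunsPre cur (c :: cs) = pvRunsPre (cur ++ [c]) cs by simp [pvRunsPre, h]]
        rw [ih.2 (cur ++ [c]) (by simp)]
        simp [List.takeWhile, List.dropWhile, h]
    · refine ⟨?_, fun cur hcur => ?_⟩
      · rw [show pvRunsPre [] (c :: cs) = pvRunsPre [] cs by simp [pvRunsPre, h]]
        rw [ih.1]; simp [pvRuns, h]
      · rw [show pvRunsPre cur (c :: cs) = cur :: pvRunsPre [] cs by simp [pvRunsPre, h, hcur]]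
        rw [ih.1]; simp [List.takeWhile, List.dropWhile, h, pvRuns]

lemma pvLoop_spec (cs : List Char) : ∀ (toks : List String) (cur : List Char),
    (if (cs.foldl pvStepA (toks, cur)).2 ≠ [] then
       (cs.foldl pvStepA (toks, cur)).1 ++ [String.ofList (cs.foldl pvStepA (toks, cur)).2]
     else (cs.foldl pvStepA (toks, cur)).1)
    = toks ++ (pvRunsPre cur cs).map String.ofList := by
  induction cs with
  | nil =>
    intro toks cur
    by_cases h : cur = [] <;> simp [pvRunsPre, h]
  | cons c cs ih =>
    intro toks cur
    by_cases h : PySem.Chars.isalnum c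
    · rw [List.foldl_cons, show pvStepA (toks, cur) c = (toks, cur ++ [c]) from by
        simp [pvStepA, h]]
      rw [ih toks (cur ++ [c])]
      simp [pvRunsPre, h]
    · by_cases hcur : cur = []
      · subst hcur
        rw [List.foldl_cons, show pvStepA (toks, ([] : List Char)) c = (toks, []) from by
          simp [pvStepA, h]]
        rw [ih toks []]
        simp [pvRunsPre, h]
      · rw [List.foldl_cons, show pvStepA (toks, cur) c = (toks ++ [String.ofList cur], []) from by
          simp [pvStepA, h, hcur]]
        rw [ih (toks ++ [String.ofList cur]) []]
        simp [pvRunsPre, h, hcur]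

-- ===== VERDICT (by name: the statement is the Claim_ definition above) =====
theorem pad_room_tokens_py_spec : Claim_equal_pad_room_tokens_py := by
  intro room _
  unfold Spec_pad_room_tokens_py pad_room_tokens_py pad_room_tokens_py_alt
  by_cases h : room = ""
  · simp [h]
  · rw [if_neg h, if_neg h]
    have := pvLoop_spec room.toList [PySem.Str.strip room] []
    have h2 := (pvRunsPre_spec room.toList).1
    simpa [h2] using this
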